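-- pv_equiv track=rewrite | github.com/three3stones/ThoughtWork_Homework | 2.4 python函数式编程/2.4.2 函数式编程两个需求.py | result
-- ===== SOURCE A (Python) =====
-- def result(items:list) -> dict:
--     """
--     @param items: 列表形式的收据清单
--     @return: 返回字典形式的条形码及其对应的数量
--     """
--     res = dict()            # 使用字典来存储条形码及其对应的数量
--     for item in items:
--         if '-' in item:
--             txm, num = item.split('-')
--             if txm in res:
--                 res[txm] += int(num)
--             else:
--                 res[txm] = int(num)
--         else:
--             if item in res:
--                 res[item] += 1
--             else:
--                 res[item] = 1
--     # 返回字典形式条形码以及数量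
--     return res
-- ===== SOURCE B (Python) =====
-- def result(items: list) -> dict:
--     """
--     @param items: 列表形式的收据清单
--     @return: 返回字典形式的条形码及其对应的数量
--     """
--     # pass 1: parse every item into a (barcode, delta) pair
--     pairs = []
--     for item in items:
--         if '-' in item:
--             txm, num = item.split('-')
--             pairs.append((txm, int(num)))
--         else:
--             pairs.append((item, 1))
--     # pass 2: group the deltas per barcode (first-occurrence order), then sum each group
--     groups = {}
--     for k, d in pairs:
--         groups.setdefault(k, []).append(d)
--     return {k: sum(v) for k, v in groups.items()}
-- ===== Notes on version B (the rewrite author's own statement) =====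
-- stated objective: alternative
-- what changed: B replaces A's single-pass running-total dict by a parse-then-group scheme: map every item to a (key, delta) pair, group the deltas into a per-key list, and build the result by summing each group.
import Mathlib
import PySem

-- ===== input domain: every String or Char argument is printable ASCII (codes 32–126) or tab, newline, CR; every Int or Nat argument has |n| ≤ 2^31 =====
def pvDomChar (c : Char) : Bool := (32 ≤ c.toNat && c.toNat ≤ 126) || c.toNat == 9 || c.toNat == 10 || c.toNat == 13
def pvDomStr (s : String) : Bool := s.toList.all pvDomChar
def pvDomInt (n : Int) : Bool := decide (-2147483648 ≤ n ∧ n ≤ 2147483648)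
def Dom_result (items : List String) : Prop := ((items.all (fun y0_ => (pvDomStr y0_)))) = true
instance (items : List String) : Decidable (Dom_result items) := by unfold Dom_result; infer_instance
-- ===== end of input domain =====

-- B is an ALTERNATIVE decomposition (parse to (key, delta) pairs, then one grouped build) of the same dict; not claimed faster.

-- ===== PORT A =====
-- loop body of A; the `none` fallbacks mark where Python raises (ValueError) — excluded by Pre_result
def resultStep (res : PySem.Dict String Int) (item : String) : PySem.Dict String Int :=
  if PySem.Str.isIn "-" item then
    match PySem.Str.split? item "-" with
    | some [txm, num] =>
        match PySem.Int.ofStr? num with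
        | some n =>
            if res.contains txm then res.insert txm ((res.get? txm).getD 0 + n)
            else res.insert txm n
        | none => res      -- int(num) raises ValueError: outside Pre_result
    | _ => res             -- unpacking 'txm, num = …' raises ValueError: outside Pre_result
  else
    if res.contains item then res.insert item ((res.get? item).getD 0 + 1)
    else res.insert item 1

def result (items : List String) : List (String × Int) :=
  (items.foldl resultStep PySem.Dict.empty).items

-- ===== PORT B =====
-- parse one item to its (barcode, delta) pair; same parsing (and the same failure points) as A
def parsePair (item : String) : String × Int :=
  if PySem.Str.isIn "-" item then
    match PySem.Str.split? item "-" with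
    | some [txm, num] =>
        match PySem.Int.ofStr? num with
        | some n => (txm, n)
        | none => (item, 0)   -- ValueError: outside Pre_result
    | _ => (item, 0)          -- ValueError: outside Pre_result
  else (item, 1)

def result_alt (items : List String) : List (String × Int) :=
  let pairs := items.map parsePair
  let groups := pairs.foldl (fun g p => g.modify p.1 [] (· ++ [p.2])) PySem.Dict.empty
  groups.items.map (fun p => (p.1, p.2.sum))

-- ===== PRECONDITION & SPEC =====
-- Pre_ excludes exactly the items on which A raises ValueError: an item with more than one '-'
-- (unpacking fails) or whose part after the '-' is not int()-parsable; B raises there too.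
def okItem (item : String) : Bool :=
  !PySem.Str.isIn "-" item ||
  (match PySem.Str.split? item "-" with
   | some [_, num] => (PySem.Int.ofStr? num).isSome
   | _ => false)

def Pre_result (items : List String) : Prop := items.all okItem = true
instance (items : List String) : Decidable (Pre_result items) := by unfold Pre_result; infer_instance
def pvWitness_result : List String := ["a", "b-2", "a", "b-3", "-5"]

def Spec_result (items : List String) (out : List (String × Int)) : Prop := out = result_alt items
instance (items : List String) (out : List (String × Int)) : Decidable (Spec_result items out) := by unfold Spec_result; infer_instance

-- ===== CLAIM (what is proved, stated in full; the proofs are below) =====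
def Claim_equal_result : Prop := ∀ (items : List String), Dom_result items → Pre_result items → Spec_result items (result items)

-- ===== LEMMAS AND PROOFS =====

-- the abstract accumulation step on a parsed pair
def pairStep (res : PySem.Dict String Int) (p : String × Int) : PySem.Dict String Int :=
  res.insert p.1 (res.getD p.1 0 + p.2)

-- under okItem, A's loop body is the pair step on the parsed item
theorem resultStep_eq_pairStep (res : PySem.Dict String Int) (item : String)
    (h : okItem item = true) :
    resultStep res item = pairStep res (parsePair item) := by
  unfold resultStep parsePair pairStep okItem at *
  by_cases hin : PySem.Str.isIn "-" item = true
  · simp only [hin, if_true, Bool.not_true, Bool.false_or] at *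
    match hs : PySem.Str.split? item "-" with
    | some [txm, num] =>
      simp only [hs] at h ⊢
      match hn : PySem.Int.ofStr? num with
      | some n =>
        by_cases hc : res.contains txm = true
        · simp [hc, PySem.Dict.getD_eq_get?_getD]
        · simp only [Bool.not_eq_true] at hc
          have h0 : res.getD txm 0 = 0 := PySem.Dict.getD_of_not_contains _ _ hc
          simp [hc, h0]
      | none => simp [hn] at h
    | some [] => simp [hs] at h
    | some [x] => simp [hs] at h
    | some (a :: b :: c :: rest) => simp [hs] at h
    | none => simp [hs] at h
  · simp only [Bool.not_eq_true] at hin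
    simp only [PySem.Str.isIn_eq] at hin
    rw [show "-".toList = ['-'] from rfl] at hin
    by_cases hc : res.contains item = true
    · simp [hin, hc, PySem.Dict.getD_eq_get?_getD]
    · simp only [Bool.not_eq_true] at hc
      have h0 : res.getD item 0 = 0 := PySem.Dict.getD_of_not_contains _ _ hc
      simp [hin, hc, h0]

theorem foldl_resultStep_eq (items : List String) (d : PySem.Dict String Int)
    (h : items.all okItem = true) :
    items.foldl resultStep d = (items.map parsePair).foldl pairStep d := by
  induction items generalizing d with
  | nil => rfl
  | cons x xs ih =>
    simp only [List.all_cons, Bool.and_eq_true] at h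
    simp only [List.map_cons, List.foldl_cons]
    rw [resultStep_eq_pairStep _ _ h.1, ih _ h.2]

-- the value at key k after the pair-accumulation loop
theorem getD_foldl_pairStep (l : List (String × Int)) (d : PySem.Dict String Int) (k : String) :
    (l.foldl pairStep d).getD k 0
      = d.getD k 0 + ((l.filter (fun p => p.1 == k)).map Prod.snd).sum := by
  induction l generalizing d with
  | nil => simp
  | cons p ps ih =>
    simp only [List.foldl_cons, List.filter_cons, ih]
    by_cases hk : p.1 = k
    · simp [pairStep, hk]
      ring
    · have heq : (p.1 == k) = false := by simp [hk]
      have hk' : ¬ k = p.1 := fun h => hk h.symm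
      simp [pairStep, heq, PySem.Dict.getD_insert, hk']

theorem result_eq_alt (items : List String) (h : Pre_result items) :
    result items = result_alt items := by
  have halt : result_alt items
      = ((items.map parsePair).foldl (fun g p => g.modify p.1 [] (· ++ [p.2]))
          PySem.Dict.empty).items.map (fun p => (p.1, p.2.sum)) := rfl
  rw [halt]
  unfold result
  rw [foldl_resultStep_eq items _ h]
  set l := items.map parsePair with hl
  set A := l.foldl pairStep PySem.Dict.empty with hA
  set B := l.foldl (fun g p => g.modify p.1 [] (· ++ [p.2])) PySem.Dict.empty with hB
  have hndA : A.keys.Nodup := by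
    simpa [hA, pairStep] using
      PySem.Dict.nodup_keys_foldl_insert_key l Prod.fst
        (fun d p => d.getD p.1 0 + p.2) PySem.Dict.empty (by simp)
  have hndB : B.keys.Nodup := by
    simpa [hB] using
      PySem.Dict.nodup_keys_foldl_modify_key l Prod.fst []
        (fun _ p => (· ++ [p.2])) PySem.Dict.empty (by simp)
  have hkeys : A.keys = B.keys := by
    have h1 := PySem.Dict.keys_foldl_insert_key (d := PySem.Dict.empty) (l := l)
      (key := Prod.fst) (f := fun d p => d.getD p.1 0 + p.2)
    have h2 := PySem.Dict.keys_foldl_modify_key (d := PySem.Dict.empty) (l := l)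
      (key := Prod.fst) (d0 := ([] : List Int)) (f := fun _ p => (· ++ [p.2]))
    rw [hA, hB, show pairStep = fun d (p : String × Int) => d.insert p.1 (d.getD p.1 0 + p.2) from rfl]
    rw [h1]; exact h2.symm ▸ rfl
  rw [PySem.Dict.items_eq_map_keys A hndA 0, PySem.Dict.items_eq_map_keys B hndB [], hkeys,
    List.map_map]
  refine List.map_congr_left ?_
  intro k hk
  simp only [Function.comp]
  rw [hA, getD_foldl_pairStep, hB, PySem.Dict.getD_foldl_modify_append]
  simp

-- ===== VERDICT (by name: the statement is the Claim_ definition above) =====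
theorem result_spec : Claim_equal_result := by
  intro items _ hpre
  unfold Spec_result
  exact result_eq_alt items hpre
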